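-- pv_equiv track=rewrite | github.com/ViddeM/advent-of-code | 2019/day_1/main.py | get_total_fuel_for_mass
-- ===== SOURCE A (Python) =====
-- def mass_to_fuel_req(mass : int):
--     return int(mass / 3) - 2
--
-- def get_total_fuel_for_mass(mass):
--     fuel = 0
--     while mass > 0:
--         fuel_req = mass_to_fuel_req(mass)
--         if fuel_req <= 0:
--             break
--
--         fuel += fuel_req
--         mass = fuel_req
--
--     return fuel
-- ===== SOURCE B (Python) =====
-- def mass_to_fuel_req(mass : int):
--     return int(mass / 3) - 2
--
-- def get_total_fuel_for_mass(mass):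
--     fuel_req = mass_to_fuel_req(mass)
--     if fuel_req <= 0:
--         return 0
--     return fuel_req + get_total_fuel_for_mass(fuel_req)
-- ===== Notes on version B (the rewrite author's own statement) =====
-- stated objective: simpler
-- what changed: Replaced the while-loop with a mutable accumulator by a direct self-recursion on the fuel recurrence: base case when the fuel requirement is non-positive, otherwise fuel_req + recurse(fuel_req).
import Mathlib
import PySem

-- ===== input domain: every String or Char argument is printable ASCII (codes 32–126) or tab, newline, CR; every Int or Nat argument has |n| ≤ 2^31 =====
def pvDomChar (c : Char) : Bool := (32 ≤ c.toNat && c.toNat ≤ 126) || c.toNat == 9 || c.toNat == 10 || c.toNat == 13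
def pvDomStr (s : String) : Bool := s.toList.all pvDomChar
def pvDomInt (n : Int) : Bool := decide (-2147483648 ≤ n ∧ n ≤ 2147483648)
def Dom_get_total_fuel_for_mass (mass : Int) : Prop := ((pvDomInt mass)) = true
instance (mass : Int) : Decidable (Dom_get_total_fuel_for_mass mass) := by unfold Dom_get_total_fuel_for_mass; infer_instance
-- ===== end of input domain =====

-- B replaces A's while-loop with an accumulator by a direct self-recursion on the
-- fuel recurrence (simpler decomposition, same cost).


-- ===== PORT A =====
-- int(mass / 3) truncates toward zero; for |mass| ≤ 2^31 the float division is
-- exact enough that this equals Int.tdiv, which rounds toward zero.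
def mass_to_fuel_req (mass : Int) : Int := mass.tdiv 3 - 2

-- the while loop of A, with its accumulator `fuel`; decreases on mass.toNat
def pvLoopA (mass fuel : Int) : Int :=
  if _h : mass > 0 then
    let fuel_req := mass_to_fuel_req mass
    if _h2 : fuel_req ≤ 0 then fuel
    else pvLoopA fuel_req (fuel + fuel_req)
  else fuel
termination_by mass.toNat
decreasing_by
  have hle : mass.tdiv 3 ≤ mass := by
    rw [Int.tdiv_eq_ediv_of_nonneg _h.le]; exact Int.ediv_le_self 3 _h.le
  simp only [mass_to_fuel_req] at *
  omega

def get_total_fuel_for_mass (mass : Int) : Int := pvLoopA mass 0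

-- ===== PORT B =====
def get_total_fuel_for_mass_alt (mass : Int) : Int :=
  let fuel_req := mass.tdiv 3 - 2   -- mass_to_fuel_req, inlined for termination
  if _h : fuel_req ≤ 0 then 0
  else fuel_req + get_total_fuel_for_mass_alt fuel_req
termination_by mass.toNat
decreasing_by
  have hpos : 0 < mass := by
    by_contra hn
    have : mass.tdiv 3 ≤ Int.tdiv 0 3 := Int.tdiv_le_tdiv (by norm_num) (by omega)
    simp [Int.zero_tdiv] at this
    omega
  have hle : mass.tdiv 3 ≤ mass := by
    rw [Int.tdiv_eq_ediv_of_nonneg hpos.le]; exact Int.ediv_le_self 3 hpos.le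
  omega

-- ===== PRECONDITION & SPEC =====
def Spec_get_total_fuel_for_mass (mass : Int) (out : Int) : Prop := out = get_total_fuel_for_mass_alt mass
instance (mass : Int) (out : Int) : Decidable (Spec_get_total_fuel_for_mass mass out) := by unfold Spec_get_total_fuel_for_mass; infer_instance

-- ===== CLAIM (what is proved, stated in full; the proofs are below) =====
def Claim_equal_get_total_fuel_for_mass : Prop := ∀ (mass : Int), Dom_get_total_fuel_for_mass mass → Spec_get_total_fuel_for_mass mass (get_total_fuel_for_mass mass)

-- ===== LEMMAS AND PROOFS =====

-- A's loop equals `fuel` plus B's recursion, by strong induction on mass.toNat.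
theorem pvLoopA_eq_alt : ∀ (n : Nat) (mass fuel : Int), mass.toNat ≤ n →
    pvLoopA mass fuel = fuel + get_total_fuel_for_mass_alt mass := by
  intro n
  induction n with
  | zero =>
    intro mass fuel hn
    have hm : mass ≤ 0 := by omega
    have hfr : mass.tdiv 3 - 2 ≤ 0 := by
      have : mass.tdiv 3 ≤ Int.tdiv 0 3 := Int.tdiv_le_tdiv (by norm_num) hm
      simp [Int.zero_tdiv] at this
      omega
    rw [pvLoopA, get_total_fuel_for_mass_alt]
    simp [hfr, Int.not_lt.mpr hm]
  | succ n ih =>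
    intro mass fuel hn
    rw [pvLoopA, get_total_fuel_for_mass_alt]
    by_cases hm : mass > 0
    · by_cases hfr : mass.tdiv 3 - 2 ≤ 0
      · simp [hm, hfr, mass_to_fuel_req]
      · simp only [hm, hfr, mass_to_fuel_req, dite_false, dif_pos]
        have hdec : (mass.tdiv 3 - 2).toNat ≤ n := by
          have hle : mass.tdiv 3 ≤ mass := by
            rw [Int.tdiv_eq_ediv_of_nonneg hm.le]; exact Int.ediv_le_self 3 hm.le
          omega
        rw [ih _ _ hdec]
        ring
    · have hm' : mass ≤ 0 := by omega
      have hfr : mass.tdiv 3 - 2 ≤ 0 := by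
        have : mass.tdiv 3 ≤ Int.tdiv 0 3 := Int.tdiv_le_tdiv (by norm_num) hm'
        simp [Int.zero_tdiv] at this
        omega
      simp [hm, hfr]

-- ===== VERDICT (by name: the statement is the Claim_ definition above) =====
theorem get_total_fuel_for_mass_spec : Claim_equal_get_total_fuel_for_mass := by
  intro mass _
  unfold Spec_get_total_fuel_for_mass get_total_fuel_for_mass
  simpa using pvLoopA_eq_alt mass.toNat mass 0 le_rfl
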